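-- pv_equiv track=rewrite | github.com/stuartburrell/AdventOfCode2020 | day18.py | convert_string_to_list
-- ===== SOURCE A (Python) =====
-- def convert_string_to_list(string):
--     output = [string[0]]
--     i  = 1
--     while i < len(string):
--         if string[i].isnumeric():
--             if output[-1].isnumeric():
--                 output[-1] += string[i]
--             else:
--                 output.append(string[i])
--         else:
--             output.append(string[i])
--         i += 1
--     return output
-- ===== SOURCE B (Python) =====
-- def convert_string_to_list(string):
--     output = []
--     i, n = 0, len(string)
--     while i < n:
--         if string[i].isnumeric():
--             j = i + 1
--             while j < n and string[j].isnumeric():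
--                 j += 1
--             output.append(string[i:j])
--             i = j
--         else:
--             output.append(string[i])
--             i += 1
--     return output
-- ===== Notes on version B (the rewrite author's own statement) =====
-- stated objective: simpler
-- what changed: B scans each maximal numeric run with an inner two-pointer loop and slices it out as one token, instead of A's stateful merging into output[-1]; B has no mutable last-token state. Pre_ excludes only the empty string, on which A raises IndexError (string[0]) while B returns [].
import Mathlib
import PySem

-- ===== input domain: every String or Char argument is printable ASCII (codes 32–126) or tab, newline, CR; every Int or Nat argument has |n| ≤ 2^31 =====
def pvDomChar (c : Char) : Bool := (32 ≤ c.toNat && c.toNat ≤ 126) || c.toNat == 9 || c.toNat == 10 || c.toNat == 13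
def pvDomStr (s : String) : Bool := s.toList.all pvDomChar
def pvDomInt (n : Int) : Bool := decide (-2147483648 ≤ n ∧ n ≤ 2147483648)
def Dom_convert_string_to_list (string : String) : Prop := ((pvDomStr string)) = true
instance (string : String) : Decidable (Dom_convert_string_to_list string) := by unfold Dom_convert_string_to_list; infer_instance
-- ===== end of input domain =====

-- B replaces A's stateful merging into output[-1] by scanning each maximal numeric
-- run with an inner loop and slicing it out as one token (objective: simpler).
-- On the ASCII domain Dom_, Python's str.isnumeric coincides with str.isdigit,
-- so both isnumeric tests are ported with PySem's strIsdigit.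

-- single-character numeric test, shared by both ports ('x.isnumeric()' on a 1-char string)
def pvDig (c : Char) : Bool := PySem.Str.strIsdigit (String.ofList [c])

-- ===== PORT A =====
-- one iteration of A's while loop: out is the accumulator 'output', c = string[i]
def pvAStep (out : List String) (c : Char) : List String :=
  if pvDig c then                                                        -- string[i].isnumeric()
    if PySem.Str.strIsdigit ((PySem.List.pyGet? out (-1)).getD "") then  -- output[-1].isnumeric(); out is never empty
      out.dropLast ++ [((PySem.List.pyGet? out (-1)).getD "") ++ String.ofList [c]]  -- output[-1] += string[i]
    else
      out ++ [String.ofList [c]]                                         -- output.append(string[i])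
  else
    out ++ [String.ofList [c]]                                           -- output.append(string[i])

def convert_string_to_list (string : String) : List String :=
  match string.toList with
  | [] => []                                              -- Python raises IndexError here (string[0]); excluded by Pre_
  | c :: rest => rest.foldl pvAStep [String.ofList [c]]   -- output = [string[0]]; while loop over the remaining chars

-- ===== PORT B =====
-- Source B's outer while loop; the inner 'while j < n and string[j].isnumeric(): j += 1'
-- followed by string[i:j] is the takeWhile, and 'i = j' the dropWhile.
-- The fuel argument (initially the string length) only makes the recursion
-- structural; it never runs out, since each step consumes at least one char.
def pvBGoF : Nat → List Char → List String
  | _, [] => []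
  | 0, _ :: _ => []
  | fuel + 1, c :: rest =>
    if pvDig c then
      String.ofList (c :: rest.takeWhile pvDig) :: pvBGoF fuel (rest.dropWhile pvDig)
    else
      String.ofList [c] :: pvBGoF fuel rest

def convert_string_to_list_alt (string : String) : List String :=
  pvBGoF string.toList.length string.toList

-- ===== PRECONDITION & SPEC =====
-- Pre_ excludes exactly the empty string, on which A raises IndexError.
def Pre_convert_string_to_list (string : String) : Prop := string ≠ ""
instance (string : String) : Decidable (Pre_convert_string_to_list string) := by unfold Pre_convert_string_to_list; infer_instance
def pvWitness_convert_string_to_list : String := "1+23"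

def Spec_convert_string_to_list (string : String) (out : List String) : Prop := out = convert_string_to_list_alt string
instance (string : String) (out : List String) : Decidable (Spec_convert_string_to_list string out) := by unfold Spec_convert_string_to_list; infer_instance

-- ===== CLAIM (what is proved, stated in full; the proofs are below) =====
def Claim_equal_convert_string_to_list : Prop := ∀ (string : String), Dom_convert_string_to_list string → Pre_convert_string_to_list string → Spec_convert_string_to_list string (convert_string_to_list string)

-- ===== LEMMAS AND PROOFS =====

-- enough fuel: the fuel argument is irrelevant once it covers the list length
theorem pvBGoF_fuel (fuel fuel' : Nat) (l : List Char)
    (h : l.length ≤ fuel) (h' : l.length ≤ fuel') : pvBGoF fuel l = pvBGoF fuel' l := by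
  induction fuel generalizing fuel' l with
  | zero =>
    cases l with
    | nil => cases fuel' <;> rfl
    | cons c rest => simp at h
  | succ f ih =>
    cases l with
    | nil => cases fuel' <;> rfl
    | cons c rest =>
      cases fuel' with
      | zero => simp at h'
      | succ f' =>
        simp only [List.length_cons] at h h'
        have hd : (rest.dropWhile pvDig).length ≤ rest.length := List.length_dropWhile_le _ _
        simp only [pvBGoF]
        by_cases hc : pvDig c = true
        · rw [if_pos hc, if_pos hc, ih f' (rest.dropWhile pvDig) (by omega) (by omega)]
        · rw [if_neg hc, if_neg hc, ih f' rest (by omega) (by omega)]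

-- B's recursion with its natural fuel, and its two unfolding equations
def pvB (l : List Char) : List String := pvBGoF l.length l

theorem pvB_cons_dig (c : Char) (rest : List Char) (hc : pvDig c = true) :
    pvB (c :: rest) = String.ofList (c :: rest.takeWhile pvDig) :: pvB (rest.dropWhile pvDig) := by
  have hd : (rest.dropWhile pvDig).length ≤ rest.length := List.length_dropWhile_le _ _
  simp only [pvB, List.length_cons, pvBGoF, if_pos hc]
  rw [pvBGoF_fuel rest.length (rest.dropWhile pvDig).length (rest.dropWhile pvDig) hd le_rfl]

theorem pvB_cons_not (c : Char) (rest : List Char) (hc : pvDig c = false) :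
    pvB (c :: rest) = String.ofList [c] :: pvB rest := by
  simp only [pvB, List.length_cons, pvBGoF, hc]
  simp

-- A's step on an accumulator with explicit last element
theorem pvAStep_last (pre : List String) (t : String) (c : Char) :
    pvAStep (pre ++ [t]) c =
      if pvDig c then
        if PySem.Str.strIsdigit t then pre ++ [t ++ String.ofList [c]]
        else pre ++ [t, String.ofList [c]]
      else pre ++ [t, String.ofList [c]] := by
  simp only [pvAStep, PySem.List.pyGet?_neg_one, List.getLast?_concat, Option.getD_some,
    List.dropLast_concat, List.append_assoc, List.cons_append, List.nil_append]

theorem pvAStep_single (t : String) (c : Char) :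
    pvAStep [t] c =
      if pvDig c then
        if PySem.Str.strIsdigit t then [t ++ String.ofList [c]]
        else [t, String.ofList [c]]
      else [t, String.ofList [c]] := by
  have h := pvAStep_last [] t c
  simpa using h

-- A's loop only ever touches the LAST element: a prefix passes through the fold
theorem pvFoldl_prefix (l : List Char) :
    ∀ (pre : List String) (t : String),
      l.foldl pvAStep (pre ++ [t]) = pre ++ l.foldl pvAStep [t] := by
  induction l with
  | nil => intro pre t; rfl
  | cons c rest ih =>
    intro pre t
    rw [List.foldl_cons, List.foldl_cons, pvAStep_last, pvAStep_single]
    by_cases hc : pvDig c = true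
    · by_cases ht : PySem.Str.strIsdigit t = true
      · rw [if_pos hc, if_pos hc, if_pos ht, if_pos ht]; exact ih pre _
      · rw [if_pos hc, if_pos hc, if_neg ht, if_neg ht]
        rw [show pre ++ [t, String.ofList [c]] = (pre ++ [t]) ++ [String.ofList [c]] by simp,
          ih (pre ++ [t]) (String.ofList [c]),
          show ([t, String.ofList [c]] : List String) = [t] ++ [String.ofList [c]] from rfl,
          ih [t] (String.ofList [c]), List.append_assoc]
    · rw [if_neg hc, if_neg hc]
      rw [show pre ++ [t, String.ofList [c]] = (pre ++ [t]) ++ [String.ofList [c]] by simp,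
        ih (pre ++ [t]) (String.ofList [c]),
        show ([t, String.ofList [c]] : List String) = [t] ++ [String.ofList [c]] from rfl,
        ih [t] (String.ofList [c]), List.append_assoc]

theorem pvStrIsdigit_ofList (ds : List Char) :
    PySem.Str.strIsdigit (String.ofList ds) = (!ds.isEmpty && ds.all PySem.Chars.isdigit) := by
  simp [PySem.Chars.strIsdigit]

theorem pvDig_eq_isdigit (c : Char) : pvDig c = PySem.Chars.isdigit c := by
  simp [pvDig, PySem.Chars.strIsdigit]

theorem pvStrIsdigit_of_run (ds : List Char) (hne : ds ≠ []) (hall : ds.all pvDig = true) :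
    PySem.Str.strIsdigit (String.ofList ds) = true := by
  rw [pvStrIsdigit_ofList]
  have h1 : ds.isEmpty = false := by simpa [List.isEmpty_eq_false_iff] using hne
  have h2 : ds.all PySem.Chars.isdigit = true := by
    rw [List.all_eq_true] at hall ⊢
    intro x hx
    rw [← pvDig_eq_isdigit]
    exact hall x hx
  rw [h1, h2]; rfl

theorem pvOfList_append (a b : List Char) :
    String.ofList a ++ String.ofList b = String.ofList (a ++ b) := by simp

-- the main invariant: from either reachable accumulator state of A
-- ([digit-run] or [single non-digit]), the rest of A's loop produces
-- exactly B's run decomposition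
theorem pvMain (l : List Char) :
    (∀ ds : List Char, ds ≠ [] → ds.all pvDig = true →
      l.foldl pvAStep [String.ofList ds]
        = String.ofList (ds ++ l.takeWhile pvDig) :: pvB (l.dropWhile pvDig)) ∧
    (∀ c : Char, pvDig c = false →
      l.foldl pvAStep [String.ofList [c]] = String.ofList [c] :: pvB l) := by
  induction l with
  | nil =>
    refine ⟨fun ds _ _ => ?_, fun c _ => ?_⟩ <;> simp [pvB, pvBGoF]
  | cons c rest ih =>
    constructor
    · intro ds hne hall
      have hds := pvStrIsdigit_of_run ds hne hall
      rw [List.foldl_cons, pvAStep_single]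
      by_cases hc : pvDig c = true
      · rw [if_pos hc, if_pos hds, pvOfList_append,
          ih.1 (ds ++ [c]) (by simp) (by rw [List.all_append]; simp [hall, hc]),
          List.takeWhile_cons, List.dropWhile_cons, if_pos hc, if_pos hc]
        simp
      · rw [if_neg hc,
          show ([String.ofList ds, String.ofList [c]] : List String)
            = [String.ofList ds] ++ [String.ofList [c]] from rfl,
          pvFoldl_prefix, ih.2 c (by simpa using hc),
          List.takeWhile_cons, List.dropWhile_cons, if_neg hc, if_neg hc,
          pvB_cons_not c rest (by simpa using hc)]
        simp
    · intro c0 hc0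
      have hs : PySem.Str.strIsdigit (String.ofList [c0]) = false := hc0
      rw [List.foldl_cons, pvAStep_single]
      by_cases hc : pvDig c = true
      · rw [if_pos hc, if_neg (by rw [hs]; simp),
          show ([String.ofList [c0], String.ofList [c]] : List String)
            = [String.ofList [c0]] ++ [String.ofList [c]] from rfl,
          pvFoldl_prefix, ih.1 [c] (by simp) (by simp [hc]),
          pvB_cons_dig c rest hc]
        simp
      · rw [if_neg hc,
          show ([String.ofList [c0], String.ofList [c]] : List String)
            = [String.ofList [c0]] ++ [String.ofList [c]] from rfl,
          pvFoldl_prefix, ih.2 c (by simpa using hc),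
          pvB_cons_not c rest (by simpa using hc)]
        simp

theorem pvAB (c : Char) (rest : List Char) :
    rest.foldl pvAStep [String.ofList [c]] = pvB (c :: rest) := by
  by_cases hc : pvDig c = true
  · rw [(pvMain rest).1 [c] (by simp) (by simp [hc]), pvB_cons_dig c rest hc]
    simp
  · rw [(pvMain rest).2 c (by simpa using hc), pvB_cons_not c rest (by simpa using hc)]

-- ===== VERDICT (by name: the statement is the Claim_ definition above) =====
theorem convert_string_to_list_spec : Claim_equal_convert_string_to_list := by
  intro s _ hpre
  unfold Spec_convert_string_to_list convert_string_to_list convert_string_to_list_alt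
  have hne : s.toList ≠ [] := by
    intro h
    apply hpre
    have := congrArg String.ofList h
    simpa using this
  match hl : s.toList with
  | [] => exact absurd hl hne
  | c :: rest => exact pvAB c rest
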